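-- pv_equiv track=rewrite | github.com/flashwade03/fablers-rag | scripts/eval/run_eval.py | _find_best_chunk
-- ===== SOURCE A (Python) =====
-- def _ngram_hits(text: str, words: list, n: int) -> int:
--     """Count how many n-gram phrases from words appear in text."""
--     hits = 0
--     for i in range(len(words) - n + 1):
--         phrase = " ".join(words[i:i + n])
--         if phrase in text:
--             hits += 1
--     return hits
--
-- def _find_best_chunk(chunk_texts: dict, words: list) -> tuple[str | None, int]:
--     """Find chunk with most n-gram hits, trying 4-gram then 3-gram then 2-gram."""
--     for n in (4, 3, 2):
--         if len(words) < n: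
--             continue
--         best_id = None
--         best_hits = 0
--         for cid, text in chunk_texts.items():
--             hits = _ngram_hits(text, words, n)
--             if hits > best_hits:
--                 best_hits = hits
--                 best_id = cid
--         if best_hits > 0:
--             return best_id, best_hits
--     return None, 0
-- ===== SOURCE B (Python) =====
-- def _find_best_chunk(chunk_texts: dict, words: list) -> tuple:
--     """Aggregate the n-gram phrases into a multiplicity table once per n, then
--     score each chunk by summing multiplicities of the distinct phrases it contains."""
--     for n in (4, 3, 2):
--         if len(words) < n:
--             continue
--         phrases = [" ".join(words[i:i + n]) for i in range(len(words) - n + 1)]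
--         counts = {}
--         for p in phrases:
--             counts[p] = counts.get(p, 0) + 1
--         best_id, best_hits = None, 0
--         for cid, text in chunk_texts.items():
--             hits = sum(c for p, c in counts.items() if p in text)
--             if hits > best_hits:
--                 best_id, best_hits = cid, hits
--         if best_hits > 0:
--             return best_id, best_hits
--     return None, 0
-- ===== Notes on version B (the rewrite author's own statement) =====
-- stated objective: faster
-- what changed: Instead of re-joining and substring-searching every word window for every chunk, B joins each window once per n, aggregates equal phrases into a multiplicity table (dict), and scores each chunk by summing the multiplicities of the distinct phrases it contains.
import Mathlib
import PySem

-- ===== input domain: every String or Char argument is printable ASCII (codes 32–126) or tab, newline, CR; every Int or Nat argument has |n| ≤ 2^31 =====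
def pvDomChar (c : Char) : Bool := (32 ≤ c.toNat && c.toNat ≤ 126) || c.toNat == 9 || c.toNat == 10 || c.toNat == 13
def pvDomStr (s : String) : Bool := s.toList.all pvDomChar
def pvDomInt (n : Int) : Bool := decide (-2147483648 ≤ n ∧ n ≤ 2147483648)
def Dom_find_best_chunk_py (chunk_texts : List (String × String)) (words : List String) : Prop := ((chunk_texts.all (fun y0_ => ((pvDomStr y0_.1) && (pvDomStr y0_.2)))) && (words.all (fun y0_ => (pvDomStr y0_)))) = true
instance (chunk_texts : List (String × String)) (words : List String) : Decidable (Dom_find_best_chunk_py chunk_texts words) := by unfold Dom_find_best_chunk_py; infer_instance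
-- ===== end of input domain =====

-- B aggregates the n-gram phrases into a multiplicity table once per n and scores each chunk
-- over the distinct phrases, instead of re-joining and searching every window per chunk.


-- ===== PORT A =====
-- helper _ngram_hits, transliterated
def ngram_hits_py (text : String) (words : List String) (n : Int) : Int :=
  (PySem.List.pyRange 0 ((words.length : Int) - n + 1) 1).foldl
    (fun hits i =>
      let phrase := PySem.Str.join " " (PySem.List.slice words (some i) (some (i + n)))
      if PySem.Str.isIn phrase text then hits + 1 else hits) 0

-- one iteration of A's 'for n in (4, 3, 2)' body: none = 'continue to next n'
def fbc_try (items : List (String × String)) (words : List String) (n : Int) :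
    Option (Option String × Int) :=
  if (words.length : Int) < n then none
  else
    let r := items.foldl
      (fun st pc =>
        let hits := ngram_hits_py pc.2 words n
        if st.2 < hits then (some pc.1, hits) else st)
      ((none : Option String), (0 : Int))
    if 0 < r.2 then some r else none

def find_best_chunk_py (chunk_texts : List (String × String)) (words : List String) : Option String × Int :=
  let items := (PySem.Dict.ofList chunk_texts).items
  match fbc_try items words 4 with
  | some r => r
  | none =>
    match fbc_try items words 3 with
    | some r => r
    | none =>
      match fbc_try items words 2 with
      | some r => r
      | none => (none, 0)

-- ===== PORT B =====
-- B: join each window once, aggregate equal phrases into a count table, score a chunk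
-- by summing the counts of the distinct phrases it contains.
def fbc_alt_try (items : List (String × String)) (words : List String) (n : Int) :
    Option (Option String × Int) :=
  if (words.length : Int) < n then none
  else
    let phrases := (PySem.List.pyRange 0 ((words.length : Int) - n + 1) 1).map
      (fun i => PySem.Str.join " " (PySem.List.slice words (some i) (some (i + n))))
    let counts := phrases.foldl (fun d p => d.insert p (d.getD p 0 + 1)) (PySem.Dict.empty)
    let r := items.foldl
      (fun st pc =>
        let hits := counts.items.foldl (fun s kc => if PySem.Str.isIn kc.1 pc.2 then s + kc.2 else s) (0 : Int)
        if st.2 < hits then (some pc.1, hits) else st)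
      ((none : Option String), (0 : Int))
    if 0 < r.2 then some r else none

def find_best_chunk_py_alt (chunk_texts : List (String × String)) (words : List String) : Option String × Int :=
  let items := (PySem.Dict.ofList chunk_texts).items
  match fbc_alt_try items words 4 with
  | some r => r
  | none =>
    match fbc_alt_try items words 3 with
    | some r => r
    | none =>
      match fbc_alt_try items words 2 with
      | some r => r
      | none => (none, 0)

-- ===== PRECONDITION & SPEC =====
def Spec_find_best_chunk_py (chunk_texts : List (String × String)) (words : List String) (out : Option String × Int) : Prop := out = find_best_chunk_py_alt chunk_texts words
instance (chunk_texts : List (String × String)) (words : List String) (out : Option String × Int) : Decidable (Spec_find_best_chunk_py chunk_texts words out) := by unfold Spec_find_best_chunk_py; infer_instance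

-- ===== CLAIM (what is proved, stated in full; the proofs are below) =====
def Claim_equal_find_best_chunk_py : Prop := ∀ (chunk_texts : List (String × String)) (words : List String), Dom_find_best_chunk_py chunk_texts words → Spec_find_best_chunk_py chunk_texts words (find_best_chunk_py chunk_texts words)

-- ===== LEMMAS AND PROOFS =====

-- 'if P k: s += g k' over a list is the initial value plus the sum of g over the filtered list
theorem pv_foldl_if_add {α : Type} (P : α → Bool) (g : α → Int) :
    ∀ (l : List α) (a : Int),
      l.foldl (fun s k => if P k then s + g k else s) a = a + ((l.filter P).map g).sum := by
  intro l
  induction l with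
  | nil => intro a; simp
  | cons x xs ih =>
    intro a
    by_cases h : P x <;> simp [List.foldl_cons, h, ih, add_assoc]

-- counting matches is the Int cast of countP
theorem pv_foldl_count (P : String → Bool) (l : List String) :
    l.foldl (fun h p => if P p then h + 1 else h) (0 : Int) = (l.countP P : Int) := by
  rw [pv_foldl_if_add P (fun _ => (1 : Int)) l 0]
  simp [List.map_const', List.sum_replicate, List.countP_eq_length_filter]

-- the distinct phrases of ps (first-insertion order) are a permutation of Mathlib's dedup
theorem pv_ofList_perm_dedup (ps : List String) :
    (PySem.Set.ofList ps).Perm ps.dedup := by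
  refine (List.perm_ext_iff_of_nodup (PySem.Set.nodup_ofList ps) (List.nodup_dedup ps)).mpr ?_
  intro x
  simp [PySem.Set.mem_ofList, List.mem_dedup]

-- CORE: summing multiplicities of the distinct phrases that match equals counting matching windows
theorem pv_sum_counts (ps : List String) (P : String → Bool) :
    (((PySem.Set.ofList ps).filter P).map (fun k => (ps.count k : Int))).sum
      = (ps.countP P : Int) := by
  rw [(((pv_ofList_perm_dedup ps).filter P).map (fun k => (ps.count k : Int))).sum_eq,
    ← List.sum_map_count_dedup_filter_eq_countP P ps, Nat.cast_list_sum, List.map_map]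
  rfl

-- B's per-chunk score over the count table equals A's window count, for every text
theorem pv_hits_eq (ps : List String) (text : String) :
    ps.foldl (fun h p => if PySem.Str.isIn p text then h + 1 else h) (0 : Int)
      = (ps.foldl (fun d p => d.insert p (d.getD p 0 + 1)) (PySem.Dict.empty)).items.foldl
          (fun s kc => if PySem.Str.isIn kc.1 text then s + kc.2 else s) 0 := by
  rw [PySem.Dict.foldl_insert_getD_add_one_eq_counter, PySem.Dict.items_counter,
    List.foldl_map, pv_foldl_if_add (fun k => PySem.Str.isIn k text) (fun k => (ps.count k : Int)),
    pv_sum_counts, pv_foldl_count]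
  simp

set_option maxHeartbeats 2000000 in
theorem pv_try_eq (items : List (String × String)) (words : List String) (n : Int) :
    fbc_try items words n = fbc_alt_try items words n := by
  unfold fbc_try fbc_alt_try
  by_cases hg : (words.length : Int) < n
  · simp [hg]
  · simp only [hg, if_false]
    have hstep : ∀ (text : String),
        ngram_hits_py text words n
          = (((PySem.List.pyRange 0 ((words.length : Int) - n + 1) 1).map
                (fun i => PySem.Str.join " " (PySem.List.slice words (some i) (some (i + n))))).foldl
              (fun d p => d.insert p (d.getD p 0 + 1)) (PySem.Dict.empty)).items.foldl
              (fun s kc => if PySem.Str.isIn kc.1 text then s + kc.2 else s) (0 : Int) := by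
      intro text
      rw [← pv_hits_eq]
      unfold ngram_hits_py
      rw [List.foldl_map]
    simp only [hstep]

-- ===== VERDICT (by name: the statement is the Claim_ definition above) =====
theorem find_best_chunk_py_spec : Claim_equal_find_best_chunk_py := by
  intro chunk_texts words _
  unfold Spec_find_best_chunk_py find_best_chunk_py find_best_chunk_py_alt
  simp only [pv_try_eq]
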